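-- pv_equiv track=rewrite | github.com/huongd17at089/ctdl-gt_2021 | DSAO3010.py | xu_ly
-- ===== SOURCE A (Python) =====
-- def xu_ly(ls):
--     ls.sort()
--     sum = 0
--     while len(ls) != 1:
--         a = ls.pop(0)
--         b = ls.pop(0)
--         sum = sum +a + b
--         ls.append(a+b)
--         ls.sort()
--     return sum
-- ===== SOURCE B (Python) =====
-- def _pop_smaller(q1, i, q2, j):
--     # return the smaller of the two queue fronts and advance that queue's head
--     if j >= len(q2) or (i < len(q1) and q1[i] <= q2[j]):
--         return q1[i], i + 1, j
--     return q2[j], i, j + 1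
--
--
-- def xu_ly(ls):
--     # Two-queue merge: sort once, then keep the original elements (q1) and the
--     # merged sums (q2, append-only and consumed from the front) as two queues
--     # read through head indices; each round takes the two smallest fronts in
--     # O(1) -- no re-sorting, no priority structure, and the caller's list is
--     # never mutated.  Correct because the two queue fronts are always the two
--     # smallest live values, so the same multiset evolution (and hence the same
--     # total) as A's sort-pop-pop-append-sort loop is produced.
--     q1 = sorted(ls)
--     q2 = []
--     i = j = 0
--     total = 0
--     while (len(q1) - i) + (len(q2) - j) > 1:
--         x, i, j = _pop_smaller(q1, i, q2, j)
--         y, i, j = _pop_smaller(q1, i, q2, j)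
--         total += x + y
--         q2.append(x + y)
--     return total
-- ===== Notes on version B (the rewrite author's own statement) =====
-- stated objective: faster
-- what changed: B replaces A's per-round pop(0)/pop(0)/append plus full re-sort of a single list by the two-queue merge: sort once, keep the original elements and the merged sums in two separate queues read through head indices, and take the two smallest live values from the two queue fronts in O(1) per merge.
import Mathlib
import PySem

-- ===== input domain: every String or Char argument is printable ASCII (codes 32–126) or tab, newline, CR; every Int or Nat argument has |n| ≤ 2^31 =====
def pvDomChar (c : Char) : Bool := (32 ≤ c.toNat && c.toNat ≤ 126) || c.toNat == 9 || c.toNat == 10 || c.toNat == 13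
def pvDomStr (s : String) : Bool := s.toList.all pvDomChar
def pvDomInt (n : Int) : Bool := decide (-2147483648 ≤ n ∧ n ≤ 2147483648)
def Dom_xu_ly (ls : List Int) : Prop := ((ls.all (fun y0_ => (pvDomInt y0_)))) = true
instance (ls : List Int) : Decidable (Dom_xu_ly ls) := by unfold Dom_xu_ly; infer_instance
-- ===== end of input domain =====

-- B replaces A's re-sort-every-round loop by the two-queue merge (sort once, take the two
-- smallest queue fronts per round in O(1)); return value only: A sorts/pops the caller's
-- list in place, B does not mutate it.

-- ===== PORT A =====
-- while len(ls) != 1: a = ls.pop(0); b = ls.pop(0); sum += a+b; ls.append(a+b); ls.sort()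
-- ([] case: Python raises IndexError there — excluded by Pre_xu_ly)
def xuLyGo : List Int → Int → Int
  | [], s => s
  | [_], s => s
  | a :: b :: rest, s =>
      xuLyGo (PySem.List.sorted (rest ++ [a + b]) (fun x => x) false) (s + a + b)
  termination_by l _ => l.length
  decreasing_by simp [PySem.List.length_sorted]

def xu_ly (ls : List Int) : Int := xuLyGo (PySem.List.sorted ls (fun x => x) false) 0

-- ===== PORT B =====
-- _pop_smaller(q1, i, q2, j) of Source B: the smaller of the two queue fronts, advancing that
-- queue's head index (the indices are Nats: they start at 0 and are only incremented; the
-- q1-front read is in range whenever the loop calls it, so getD's default is never used)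
def popSmaller (q1 : List Int) (i : Nat) (q2 : List Int) (j : Nat) : Int × Nat × Nat :=
  if q2.length ≤ j ∨ (i < q1.length ∧ q1.getD i 0 ≤ q2.getD j 0) then
    (q1.getD i 0, i + 1, j)
  else
    (q2.getD j 0, i, j + 1)

-- while (len(q1)-i) + (len(q2)-j) > 1: pop the two smallest fronts, append their sum to q2.
-- fuel only makes the loop structural: each round consumes one live element, so the initial
-- number of live elements (= len(ls), passed below) always suffices
def xuLyAltGo (fuel : Nat) (q1 : List Int) (q2 : List Int) (i j : Nat) (total : Int) : Int :=
  match fuel with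
  | 0 => total
  | fuel + 1 =>
    if 1 < (q1.length - i) + (q2.length - j) then
      let p := popSmaller q1 i q2 j
      let q := popSmaller q1 p.2.1 q2 p.2.2
      xuLyAltGo fuel q1 (q2 ++ [p.1 + q.1]) q.2.1 q.2.2 (total + (p.1 + q.1))
    else total

def xu_ly_alt (ls : List Int) : Int :=
  xuLyAltGo ls.length (PySem.List.sorted ls (fun x => x) false) [] 0 0 0

-- ===== PRECONDITION & SPEC =====
-- Pre_ excludes only the empty list, on which A raises IndexError (pop from empty list)
def Pre_xu_ly (ls : List Int) : Prop := ls ≠ []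
instance (ls : List Int) : Decidable (Pre_xu_ly ls) := by unfold Pre_xu_ly; infer_instance
def pvWitness_xu_ly : List Int := [3, 1, 2]

def Spec_xu_ly (ls : List Int) (out : Int) : Prop := out = xu_ly_alt ls
instance (ls : List Int) (out : Int) : Decidable (Spec_xu_ly ls out) := by unfold Spec_xu_ly; infer_instance

-- ===== CLAIM (what is proved, stated in full; the proofs are below) =====
def Claim_equal_xu_ly : Prop := ∀ (ls : List Int), Dom_xu_ly ls → Pre_xu_ly ls → Spec_xu_ly ls (xu_ly ls)

-- ===== LEMMAS AND PROOFS =====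

-- the loop invariant: every merged sum sitting in the queue is bounded by the sum of ANY
-- two elements that could still be consumed before it (all live originals plus the part
-- of the sum-queue in front of it) — this is what keeps the sum-queue sorted, negatives included
def Bnd (a b : List Int) : Prop :=
  ∀ k, k < b.length → ∀ u v : Int,
    ([u, v] : List Int).Subperm (a ++ b.take k) → b.getD k 0 ≤ u + v

-- one pop: advances exactly one head, returns the minimum of all live elements, and the
-- popped value is exactly the consumed segment of the two queues
theorem popSmaller_spec (q1 q2 : List Int) (i j : Nat) (m : Int) (i' j' : Nat)
    (he : popSmaller q1 i q2 j = (m, i', j'))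
    (hi : i ≤ q1.length) (hj : j ≤ q2.length)
    (hne : 1 ≤ (q1.length - i) + (q2.length - j))
    (h1 : (q1.drop i).Pairwise (· ≤ ·)) (h2 : (q2.drop j).Pairwise (· ≤ ·)) :
    i ≤ i' ∧ j ≤ j' ∧ i' + j' = i + j + 1 ∧ i' ≤ q1.length ∧ j' ≤ q2.length ∧
    (m :: (q1.drop i' ++ q2.drop j')).Perm (q1.drop i ++ q2.drop j) ∧
    (∀ z ∈ q1.drop i' ++ q2.drop j', m ≤ z) ∧
    ([m] : List Int).Perm ((q1.drop i).take (i' - i) ++ (q2.drop j).take (j' - j)) := by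
  unfold popSmaller at he
  split_ifs at he with hc
  · -- popped from q1
    injection he with e1 e2; injection e2 with e2 e3; subst e1; subst e2; subst e3
    have hiL : i < q1.length := by
      rcases hc with hc | hc
      · omega
      · exact hc.1
    have hdrop : q1.drop i = q1[i] :: q1.drop (i + 1) := List.drop_eq_getElem_cons hiL
    have hm : q1.getD i 0 = q1[i] := List.getD_eq_getElem q1 0 hiL
    have hminq2 : ∀ z ∈ q2.drop j, q1.getD i 0 ≤ z := by
      intro z hz
      by_cases hjL : j < q2.length
      · have hc2 : q1.getD i 0 ≤ q2.getD j 0 := by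
          rcases hc with hc | hc
          · omega
          · exact hc.2
        have hd2 : q2.drop j = q2[j] :: q2.drop (j + 1) := List.drop_eq_getElem_cons hjL
        have hj0 : q2.getD j 0 = q2[j] := List.getD_eq_getElem q2 0 hjL
        rw [hd2] at hz
        rcases List.mem_cons.1 hz with rfl | hz'
        · rw [hj0] at hc2; exact hc2
        · have := List.rel_of_pairwise_cons (hd2 ▸ h2) hz'
          rw [hj0] at hc2; exact le_trans hc2 this
      · rw [List.drop_eq_nil_of_le (by omega)] at hz; cases hz
    refine ⟨by omega, le_refl _, by omega, by omega, hj, ?_, ?_, ?_⟩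
    · rw [hdrop, hm, List.cons_append]
    · intro z hz
      rcases List.mem_append.1 hz with hz | hz
      · rw [hm]; exact List.rel_of_pairwise_cons (hdrop ▸ h1) hz
      · exact hminq2 z hz
    · have : i + 1 - i = 1 := by omega
      rw [this, Nat.sub_self, List.take_zero, List.append_nil, hdrop, List.take_succ_cons,
        List.take_zero, hm]
  · -- popped from q2
    injection he with e1 e2; injection e2 with e2 e3; subst e1; subst e2; subst e3
    push Not at hc
    obtain ⟨hjL, hc2⟩ := hc
    have hjL : j < q2.length := by omega
    have hd2 : q2.drop j = q2[j] :: q2.drop (j + 1) := List.drop_eq_getElem_cons hjL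
    have hj0 : q2.getD j 0 = q2[j] := List.getD_eq_getElem q2 0 hjL
    have hminq1 : ∀ z ∈ q1.drop i, q2.getD j 0 ≤ z := by
      intro z hz
      by_cases hiL : i < q1.length
      · have hlt : q2.getD j 0 < q1.getD i 0 := hc2 hiL
        have hd1 : q1.drop i = q1[i] :: q1.drop (i + 1) := List.drop_eq_getElem_cons hiL
        have hi0 : q1.getD i 0 = q1[i] := List.getD_eq_getElem q1 0 hiL
        rw [hd1] at hz
        rcases List.mem_cons.1 hz with rfl | hz'
        · rw [hi0] at hlt; exact le_of_lt hlt
        · have := List.rel_of_pairwise_cons (hd1 ▸ h1) hz'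
          rw [hi0] at hlt; exact le_trans (le_of_lt hlt) this
      · rw [List.drop_eq_nil_of_le (by omega)] at hz; cases hz
    refine ⟨le_refl _, by omega, by omega, hi, by omega, ?_, ?_, ?_⟩
    · calc (q2.getD j 0 :: (q1.drop i ++ q2.drop (j + 1))).Perm
            (q1.drop i ++ q2.getD j 0 :: q2.drop (j + 1)) := List.perm_middle.symm
        _ = q1.drop i ++ q2.drop j := by rw [hj0, ← hd2]
    · intro z hz
      rcases List.mem_append.1 hz with hz | hz
      · exact hminq1 z hz
      · rw [hj0]; exact List.rel_of_pairwise_cons (hd2 ▸ h2) hz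
    · have : j + 1 - j = 1 := by omega
      rw [Nat.sub_self, this, List.take_zero, List.nil_append, hd2, List.take_succ_cons,
        List.take_zero, hj0]

-- one loop round as an equation
theorem xuLyAltGo_step (fuel : Nat) (q1 q2 : List Int) (i j : Nat) (t : Int)
    (hg : 1 < (q1.length - i) + (q2.length - j))
    (x y : Int) (i1 j1 i2 j2 : Nat)
    (h1 : popSmaller q1 i q2 j = (x, i1, j1)) (h2 : popSmaller q1 i1 q2 j1 = (y, i2, j2)) :
    xuLyAltGo (fuel + 1) q1 q2 i j t = xuLyAltGo fuel q1 (q2 ++ [x + y]) i2 j2 (t + (x + y)) := by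
  rw [xuLyAltGo]
  simp only [if_pos hg, h1, h2]

-- getD through a drop
theorem getD_drop' (l : List Int) (n i : Nat) : (l.drop n).getD i 0 = l.getD (n + i) 0 := by
  simp [List.getD, List.getElem?_drop]

-- drops compose
theorem drop_drop_of_le {l : List Int} {i i' : Nat} (h : i ≤ i') :
    l.drop i' = (l.drop i).drop (i' - i) := by
  rw [List.drop_drop]; congr 1; omega

-- the main equivalence: the two-queue state always produces what A's re-sorting loop
-- produces on the sorted multiset of the live elements
theorem altGo_eq (fuel : Nat) : ∀ (q1 q2 : List Int) (i j : Nat) (t : Int),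
    i ≤ q1.length → j ≤ q2.length → (q1.length - i) + (q2.length - j) ≤ fuel →
    (q1.drop i).Pairwise (· ≤ ·) → (q2.drop j).Pairwise (· ≤ ·) →
    Bnd (q1.drop i) (q2.drop j) →
    xuLyAltGo fuel q1 q2 i j t = xuLyGo (PySem.List.sorted ((q1.drop i) ++ (q2.drop j)) (fun x => x) false) t := by
  induction fuel with
  | zero =>
    intro q1 q2 i j t hi hj hn h1 h2 hB
    have e1 : q1.drop i = [] := List.drop_eq_nil_of_le (by omega)
    have e2 : q2.drop j = [] := List.drop_eq_nil_of_le (by omega)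
    rw [e1, e2]
    show t = xuLyGo (PySem.List.sorted [] (fun x => x) false) t
    rw [show PySem.List.sorted ([] : List Int) (fun x => x) false = [] from rfl, xuLyGo]
  | succ f ih =>
    intro q1 q2 i j t hi hj hn h1 h2 hB
    by_cases hg : 1 < (q1.length - i) + (q2.length - j)
    · -- a merge round happens
      rcases hp1 : popSmaller q1 i q2 j with ⟨x, i1, j1⟩
      obtain ⟨hii1, hjj1, hsum1, hi1L, hj1L, hperm1, hmin1, hseg1⟩ :=
        popSmaller_spec q1 q2 i j x i1 j1 hp1 hi hj (by omega) h1 h2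
      have h1' : (q1.drop i1).Pairwise (· ≤ ·) := by
        rw [drop_drop_of_le hii1]; exact h1.sublist (List.drop_sublist _ _)
      have h2' : (q2.drop j1).Pairwise (· ≤ ·) := by
        rw [drop_drop_of_le hjj1]; exact h2.sublist (List.drop_sublist _ _)
      rcases hp2 : popSmaller q1 i1 q2 j1 with ⟨y, i2, j2⟩
      obtain ⟨hii2, hjj2, hsum2, hi2L, hj2L, hperm2, hmin2, hseg2⟩ :=
        popSmaller_spec q1 q2 i1 j1 y i2 j2 hp2 hi1L hj1L (by omega) h1' h2'
      set rem := q1.drop i2 ++ q2.drop j2 with hrem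
      have hxy : x ≤ y := hmin1 y (hperm2.mem_iff.1 (List.mem_cons_self))
      have hyall : ∀ z ∈ rem, y ≤ z := hmin2
      have hxall : ∀ z ∈ rem, x ≤ z := fun z hz =>
        hmin1 z (hperm2.mem_iff.1 (List.mem_cons_of_mem _ hz))
      -- every sum still queued is ≤ x + y
      have hq2bound : ∀ k, k < (q2.drop j2).length → (q2.drop j2).getD k 0 ≤ x + y := by
        intro k hk
        have hkL : j2 - j + k < (q2.drop j).length := by
          simp only [List.length_drop] at hk ⊢; omega
        have hgd : (q2.drop j).getD (j2 - j + k) 0 = (q2.drop j2).getD k 0 := by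
          rw [getD_drop', getD_drop']
          congr 1
          omega
        have hsub : ([x, y] : List Int).Subperm (q1.drop i ++ (q2.drop j).take (j2 - j + k)) := by
          -- [x, y] is a permutation of the consumed segments
          have hxyperm : ([x, y] : List Int).Perm
              (((q1.drop i).take (i1 - i) ++ (q2.drop j).take (j1 - j)) ++
               ((q1.drop i1).take (i2 - i1) ++ (q2.drop j1).take (j2 - j1))) := by
            have : ([x, y] : List Int) = [x] ++ [y] := rfl
            rw [this]
            exact hseg1.append hseg2
          have hre : (((q1.drop i).take (i1 - i) ++ (q2.drop j).take (j1 - j)) ++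
               ((q1.drop i1).take (i2 - i1) ++ (q2.drop j1).take (j2 - j1))).Perm
              (((q1.drop i).take (i1 - i) ++ (q1.drop i1).take (i2 - i1)) ++
               ((q2.drop j).take (j1 - j) ++ (q2.drop j1).take (j2 - j1))) := by
            simp only [← List.append_assoc]
            refine List.Perm.append_right _ ?_
            simp only [List.append_assoc]
            exact List.Perm.append_left _ (List.perm_append_comm)
          have hq1seg : (q1.drop i).take (i1 - i) ++ (q1.drop i1).take (i2 - i1) =
              (q1.drop i).take (i2 - i) := by
            rw [drop_drop_of_le hii1, ← List.take_add]
            congr 1; omega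
          have hq2seg : (q2.drop j).take (j1 - j) ++ (q2.drop j1).take (j2 - j1) =
              (q2.drop j).take (j2 - j) := by
            rw [drop_drop_of_le hjj1, ← List.take_add]
            congr 1; omega
          refine List.Subperm.trans ⟨_, (hxyperm.trans hre).symm, ?_⟩ (List.Sublist.subperm (List.Sublist.refl _))
          rw [hq1seg, hq2seg]
          refine List.Sublist.append (List.take_sublist _ _) ?_
          have : (q2.drop j).take (j2 - j + k) =
              (q2.drop j).take (j2 - j) ++ ((q2.drop j).drop (j2 - j)).take k :=
            List.take_add ..
          rw [this]
          exact List.sublist_append_left _ _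
        have := hB (j2 - j + k) hkL x y hsub
        rw [hgd] at this
        exact this
      -- head of the sorted live list = x :: y :: sorted rem
      have hs : PySem.List.sorted (q1.drop i ++ q2.drop j) (fun x => x) false =
          x :: y :: PySem.List.sorted rem (fun x => x) false := by
        refine PySem.List.sorted_id_eq_of_perm_of_pairwise _ _ ?_ ?_
        · exact (List.Perm.cons x (List.Perm.cons y (PySem.List.sorted_perm rem (fun x => x) false))).trans
            ((List.Perm.cons x hperm2).trans hperm1)
        · refine List.pairwise_cons.2 ⟨?_, List.pairwise_cons.2 ⟨?_, ?_⟩⟩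
          · intro z hz
            rcases List.mem_cons.1 hz with rfl | hz'
            · exact hxy
            · exact hxall z ((PySem.List.mem_sorted _ _ _ _).1 hz')
          · intro z hz
            exact hyall z ((PySem.List.mem_sorted _ _ _ _).1 hz)
          · exact PySem.List.sorted_pairwise rem (fun x => x)
      -- A's side takes one step
      have hA : xuLyGo (PySem.List.sorted (q1.drop i ++ q2.drop j) (fun x => x) false) t =
          xuLyGo (PySem.List.sorted (PySem.List.sorted rem (fun x => x) false ++ [x + y]) (fun x => x) false) (t + x + y) := by
        rw [hs, xuLyGo]
      -- B's side takes one step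
      rw [xuLyAltGo_step f q1 q2 i j t hg x y i1 j1 i2 j2 hp1 hp2]
      -- the new sum-queue drop
      have hdropnew : (q2 ++ [x + y]).drop j2 = q2.drop j2 ++ [x + y] :=
        List.drop_append_of_le_length hj2L
      -- apply the induction hypothesis to the new state
      have hpair2' : ((q2 ++ [x + y]).drop j2).Pairwise (· ≤ ·) := by
        rw [hdropnew]
        refine List.pairwise_append.2 ⟨?_, by simp, ?_⟩
        · rw [drop_drop_of_le (le_trans hjj1 hjj2)]; exact h2.sublist (List.drop_sublist _ _)
        · intro z hz w hw
          rcases List.mem_singleton.1 hw with rfl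
          obtain ⟨k, hk, rfl⟩ := List.mem_iff_getElem.1 hz
          rw [← List.getD_eq_getElem _ 0 hk]
          exact hq2bound k hk
      have hpair1' : (q1.drop i2).Pairwise (· ≤ ·) := by
        rw [drop_drop_of_le (le_trans hii1 hii2)]; exact h1.sublist (List.drop_sublist _ _)
      have hBnd' : Bnd (q1.drop i2) ((q2 ++ [x + y]).drop j2) := by
        rw [hdropnew]
        intro k hk u v hsub
        simp only [List.length_append, List.length_cons, List.length_nil] at hk
        by_cases hkcase : k < (q2.drop j2).length
        · -- an old queued sum: transfer the pair into the old prefix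
          rw [List.getD_append _ _ _ _ hkcase]
          have hkL : j2 - j + k < (q2.drop j).length := by
            simp only [List.length_drop] at hkcase ⊢; omega
          have hgd : (q2.drop j).getD (j2 - j + k) 0 = (q2.drop j2).getD k 0 := by
            rw [getD_drop', getD_drop']
            congr 1
            omega
          rw [← hgd]
          refine hB (j2 - j + k) hkL u v (List.Subperm.trans hsub (List.Sublist.subperm ?_))
          rw [List.take_append_of_le_length (by omega)]
          refine List.Sublist.append ?_ ?_
          · rw [drop_drop_of_le (le_trans hii1 hii2)]; exact List.drop_sublist _ _
          · have : (q2.drop j).take (j2 - j + k) =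
                (q2.drop j).take (j2 - j) ++ ((q2.drop j).drop (j2 - j)).take k :=
              List.take_add ..
            rw [this, drop_drop_of_le (le_trans hjj1 hjj2)]
            exact List.sublist_append_right _ _
        · -- the freshly appended sum: bounded by any surviving pair since all survivors ≥ y ≥ x
          have hkeq : k = (q2.drop j2).length := by omega
          subst hkeq
          have hget : (q2.drop j2 ++ [x + y]).getD (q2.drop j2).length 0 = x + y := by
            rw [List.getD_eq_getElem _ 0 (by simp)]
            simp
          rw [hget]
          rw [List.take_append_of_le_length (le_refl _), List.take_length] at hsub
          have hu : u ∈ rem := hsub.subset (by simp)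
          have hv : v ∈ rem := hsub.subset (by simp)
          have := hyall u hu
          have := hyall v hv
          omega
      have hIH := ih q1 (q2 ++ [x + y]) i2 j2 (t + (x + y)) hi2L
        (by simp only [List.length_append, List.length_cons, List.length_nil]; omega)
        (by simp only [List.length_append, List.length_cons, List.length_nil]; omega)
        hpair1' hpair2' hBnd'
      rw [hIH, hA]
      congr 1
      · rw [hdropnew, ← List.append_assoc]
        refine PySem.List.sorted_eq_sorted_of_perm _ _ _ (fun a b h => h) ?_
        exact List.Perm.append_right _ (PySem.List.sorted_perm rem (fun x => x) false).symm
      · omega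
    · -- at most one live element: both sides return the accumulator
      rw [xuLyAltGo]
      rw [if_neg hg]
      have hlen : (PySem.List.sorted (q1.drop i ++ q2.drop j) (fun x => x) false).length ≤ 1 := by
        rw [PySem.List.length_sorted]
        simp only [List.length_append, List.length_drop]
        omega
      rcases hL : PySem.List.sorted (q1.drop i ++ q2.drop j) (fun x => x) false with _ | ⟨a, _ | ⟨b, r⟩⟩
      · rw [xuLyGo]
      · rw [xuLyGo]
      · rw [hL] at hlen; simp at hlen

-- ===== VERDICT (by name: the statement is the Claim_ definition above) =====
theorem xu_ly_spec : Claim_equal_xu_ly := by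
  intro ls _ _
  unfold Spec_xu_ly xu_ly xu_ly_alt
  have h := altGo_eq ls.length
      (PySem.List.sorted ls (fun x => x) false) [] 0 0 0
      (by simp) (by simp) (by simp [PySem.List.length_sorted])
      (by simpa using PySem.List.sorted_pairwise ls (fun x => x))
      (by simp) (by intro k hk u v hs; simp at hk)
  rw [h]
  congr 1
  simp only [List.drop_zero, List.append_nil]
  exact (PySem.List.sorted_sorted ls (fun x => x)).symm
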